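-- pv_equiv track=rewrite | github.com/MikeErkemey/AdventOfCode_2024 | solutions/day12/part1.py | solve
-- ===== SOURCE A (Python) =====
-- from collections import deque
--
-- def solve(input):
--     computedGardens = set()
--     res = 0
--     for i in  range(len(input)):
--         for j in range(len(input[i])):
--             if (j,i) not in computedGardens:
--                 garden = getGarden(computedGardens, j, i, input, input[i][j])
--                 res += computeGarden(garden)
--
--
--     return res
--
-- def getGarden(computedGardens, x,y, input, type):
--     q = deque()
--     q.append((x, y))
--     garden = set()
--
--     dirs = [(-1, 0), (1, 0), (0, 1), (0, -1)]
--     while len(q) != 0: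
--         p = q.popleft()
--
--         if p in garden:
--             continue
--
--         garden.add(p)
--         computedGardens.add(p)
--
--         for d in dirs:
--             dp = (p[0] - d[0], p[1] - d[1])
--             if 0 <= dp[0] < len(input[0]) and 0 <= dp[1] < len(input):
--                 if input[dp[1]][dp[0]] == type:
--                     q.append(dp)
--
--     return garden
--
-- def computeGarden(garden) -> int:
--     minX, maxX = (f(x[0] for x in garden) for f in (min, max))
--     minY, maxY = (f(x[1] for x in garden) for f in (min, max))
--
--     area = len(garden)
--
--     xPer = 0
--     yPer = 0
--     for i in range(minX, maxX+1):
--         t = False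
--         for j in range(minY, maxY+1):
--             if (i,j) in garden:
--                 if not t:
--                     xPer += 1
--                 t = True
--             else:
--                 t = False
--     for j in range(minY, maxY + 1):
--         t = False
--         for i in range(minX, maxX+1):
--             if (i,j) in garden:
--                 if not t:
--                     yPer += 1
--                 t = True
--             else:
--                 t = False
--
--     return (yPer*2 + xPer*2) * area
-- ===== SOURCE B (Python) =====
-- def solve(input):
--     total = 0
--     seen = set()
--     height = len(input)
--     width = len(input[0]) if input else 0
--     for y in range(height):
--         for x in range(len(input[y])):
--             if (x, y) in seen:
--                 continue
--             t = input[y][x]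
--             queue = [(x, y)]
--             k = 0
--             garden = set()
--             while k < len(queue):
--                 p = queue[k]
--                 k += 1
--                 if p in garden:
--                     continue
--                 garden.add(p)
--                 seen.add(p)
--                 px, py = p
--                 for nx, ny in ((px + 1, py), (px - 1, py), (px, py - 1), (px, py + 1)):
--                     if 0 <= nx < width and 0 <= ny < height and input[ny][nx] == t:
--                         queue.append((nx, ny))
--             perim = 0
--             for (px, py) in garden:
--                 if (px - 1, py) not in garden:
--                     perim += 2
--                 if (px, py - 1) not in garden:
--                     perim += 2
--             total += len(garden) * perim
--     return total
-- ===== Notes on version B (the rewrite author's own statement) =====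
-- stated objective: alternative
-- what changed: Per-region perimeter is computed by one direct count over the region's cells (2 per missing left/up neighbour in the region set) instead of A's two nested bounding-box scans with a run flag, and A's deque flood fill plus helper functions are fused into a single pass using a cursor-indexed queue list.
import Mathlib
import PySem

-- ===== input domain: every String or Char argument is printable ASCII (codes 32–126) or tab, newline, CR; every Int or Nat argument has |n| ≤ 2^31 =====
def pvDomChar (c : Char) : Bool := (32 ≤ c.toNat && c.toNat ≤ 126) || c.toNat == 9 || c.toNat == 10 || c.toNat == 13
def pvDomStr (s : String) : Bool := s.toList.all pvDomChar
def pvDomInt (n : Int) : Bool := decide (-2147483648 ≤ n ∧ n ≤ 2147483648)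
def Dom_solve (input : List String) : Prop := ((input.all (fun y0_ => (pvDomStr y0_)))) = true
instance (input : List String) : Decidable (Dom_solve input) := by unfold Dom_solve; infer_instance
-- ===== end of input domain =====

-- B replaces A's per-region bounding-box double scans (run counting with a flag) by one direct
-- count over the region's cells of their missing left/up neighbours; region flood fill as in A.
-- The BFS while-loops are ported with a fuel counter that provably exceeds the number of loop
-- iterations Python performs (≤ 1 + 4·(width·height+1)); the fuel guard only makes the port total.

-- ===== PORT A =====
def rowA (input : List String) (y : Int) : List Char :=
  ((PySem.List.pyGet? input y).getD "").toList

-- input[y][x]; total form, exact on Pre_ (every probe is in range there)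
def cellA (input : List String) (x y : Int) : Char :=
  (PySem.List.pyGet? (rowA input y) x).getD ' '

-- len(input[0])
def widthA (input : List String) : Int := ((rowA input 0).length : Int)

def dirsA : List (Int × Int) := [(-1, 0), (1, 0), (0, 1), (0, -1)]

-- the while-loop of getGarden; state (q, garden, computedGardens), returns (garden, computedGardens)
def getGardenA (input : List String) (ty : Char) :
    Nat → List (Int × Int) → PySem.Set (Int × Int) → PySem.Set (Int × Int) →
    PySem.Set (Int × Int) × PySem.Set (Int × Int)
  | 0, _, garden, computed => (garden, computed)
  | _ + 1, [], garden, computed => (garden, computed)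
  | fuel + 1, p :: q, garden, computed =>
    if p ∈ garden then getGardenA input ty fuel q garden computed
    else
      getGardenA input ty fuel
        (q ++ dirsA.filterMap (fun d =>
          let dp := (p.1 - d.1, p.2 - d.2)
          if 0 ≤ dp.1 ∧ dp.1 < widthA input ∧ 0 ≤ dp.2 ∧ dp.2 < (input.length : Int)
              ∧ cellA input dp.1 dp.2 = ty then some dp else none))
        (PySem.Set.add garden p) (PySem.Set.add computed p)

-- fuel that always exceeds the loop's iteration count (loop pops one element per step and
-- pushes at most 4·(number of distinct cells) + 1 elements in total)
def fuelA (input : List String) : Nat := 4 * ((widthA input).toNat * input.length + 1) + 8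

def computeGardenA (garden : List (Int × Int)) : Int :=
  let minX := (PySem.List.min? (garden.map Prod.fst) (fun v => v)).getD 0
  let maxX := (PySem.List.max? (garden.map Prod.fst) (fun v => v)).getD 0
  let minY := (PySem.List.min? (garden.map Prod.snd) (fun v => v)).getD 0
  let maxY := (PySem.List.max? (garden.map Prod.snd) (fun v => v)).getD 0
  let area : Int := (garden.length : Int)
  let xPer := (PySem.List.pyRange minX (maxX + 1) 1).foldl (fun acc i =>
    ((PySem.List.pyRange minY (maxY + 1) 1).foldl (fun (st : Int × Bool) j =>
      if (i, j) ∈ garden then (if st.2 then st else (st.1 + 1, true)) else (st.1, false))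
      (acc, false)).1) 0
  let yPer := (PySem.List.pyRange minY (maxY + 1) 1).foldl (fun acc j =>
    ((PySem.List.pyRange minX (maxX + 1) 1).foldl (fun (st : Int × Bool) i =>
      if (i, j) ∈ garden then (if st.2 then st else (st.1 + 1, true)) else (st.1, false))
      (acc, false)).1) 0
  (yPer * 2 + xPer * 2) * area

def solve (input : List String) : Int :=
  ((PySem.List.pyRange 0 (input.length : Int) 1).foldl
    (fun (st : PySem.Set (Int × Int) × Int) i =>
      (PySem.List.pyRange 0 ((rowA input i).length : Int) 1).foldl (fun st j =>
        if (j, i) ∈ st.1 then st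
        else
          let r := getGardenA input (cellA input j i) (fuelA input) [(j, i)] PySem.Set.empty st.1
          (r.2, st.2 + computeGardenA r.1)) st)
    (PySem.Set.empty, 0)).2

-- ===== PORT B =====
def rowB (input : List String) (y : Int) : List Char :=
  ((PySem.List.pyGet? input y).getD "").toList

def cellB (input : List String) (x y : Int) : Char :=
  (PySem.List.pyGet? (rowB input y) x).getD ' '

-- len(input[0]) if input else 0
def widthB (input : List String) : Int :=
  match input with
  | [] => 0
  | r :: _ => (r.toList.length : Int)

-- B's while-loop: a growing queue list read through a cursor k (never popped);
-- state (queue, k, garden, seen), returns (garden, seen); same fuel device as port A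
def bfsB (input : List String) (t : Char) (width height : Int) :
    Nat → List (Int × Int) → Nat → PySem.Set (Int × Int) → PySem.Set (Int × Int) →
    PySem.Set (Int × Int) × PySem.Set (Int × Int)
  | 0, _, _, garden, seen => (garden, seen)
  | fuel + 1, queue, k, garden, seen =>
    match queue[k]? with
    | none => (garden, seen)
    | some p =>
      if p ∈ garden then bfsB input t width height fuel queue (k + 1) garden seen
      else
        bfsB input t width height fuel
          (queue ++ [(p.1 + 1, p.2), (p.1 - 1, p.2), (p.1, p.2 - 1), (p.1, p.2 + 1)].filter
            (fun c => decide (0 ≤ c.1 ∧ c.1 < width ∧ 0 ≤ c.2 ∧ c.2 < height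
              ∧ cellB input c.1 c.2 = t)))
          (k + 1) (PySem.Set.add garden p) (PySem.Set.add seen p)

def fuelB (input : List String) : Nat := 4 * ((widthB input).toNat * input.length + 1) + 8

-- perim accumulation loop over the region's cells (a sum over a set: order-independent)
def perimB (garden : PySem.Set (Int × Int)) : Int :=
  garden.foldl (fun acc p =>
    let acc1 := if (p.1 - 1, p.2) ∈ garden then acc else acc + 2
    if (p.1, p.2 - 1) ∈ garden then acc1 else acc1 + 2) 0

def solve_alt (input : List String) : Int :=
  let height : Int := (input.length : Int)
  let width : Int := widthB input
  ((PySem.List.pyRange 0 height 1).foldl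
    (fun (st : PySem.Set (Int × Int) × Int) y =>
      (PySem.List.pyRange 0 ((rowB input y).length : Int) 1).foldl (fun st x =>
        if (x, y) ∈ st.1 then st
        else
          let r := bfsB input (cellB input x y) width height (fuelB input) [(x, y)] 0
            PySem.Set.empty st.1
          (r.2, st.2 + (r.1.length : Int) * perimB r.1)) st)
    (PySem.Set.empty, 0)).2

-- ===== PRECONDITION & SPEC =====
-- Pre_ excludes exactly the inputs on which A raises IndexError: whenever some row is shorter
-- than row 0, the flood fill probes a missing character input[y][x] (x < len(input[0])).
def Pre_solve (input : List String) : Prop :=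
  ∀ s ∈ input, (input.headD "").toList.length ≤ s.toList.length
instance (input : List String) : Decidable (Pre_solve input) := by unfold Pre_solve; infer_instance

def pvWitness_solve : List String := ["aab", "bba", "acc"]

def Spec_solve (input : List String) (out : Int) : Prop := out = solve_alt input
instance (input : List String) (out : Int) : Decidable (Spec_solve input out) := by
  unfold Spec_solve; infer_instance

-- ===== CLAIM (what is proved, stated in full; the proofs are below) =====
def Claim_equal_solve : Prop :=
  ∀ (input : List String), Dom_solve input → Pre_solve input → Spec_solve input (solve input)

-- ===== LEMMAS AND PROOFS =====

theorem widthB_eq (input : List String) : widthB input = widthA input := by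
  cases input <;> simp [widthA, widthB, rowA, PySem.List.pyGet?, PySem.List.pyIdx?]

theorem fuelB_eq (input : List String) : fuelB input = fuelA input := by
  simp [fuelA, fuelB, widthB_eq]

theorem queue_push_eq (input : List String) (ty : Char) (p : Int × Int) :
    dirsA.filterMap (fun d =>
      let dp := (p.1 - d.1, p.2 - d.2)
      if 0 ≤ dp.1 ∧ dp.1 < widthA input ∧ 0 ≤ dp.2 ∧ dp.2 < (input.length : Int)
          ∧ cellA input dp.1 dp.2 = ty then some dp else none)
    = [(p.1 + 1, p.2), (p.1 - 1, p.2), (p.1, p.2 - 1), (p.1, p.2 + 1)].filter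
        (fun c => decide (0 ≤ c.1 ∧ c.1 < widthB input ∧ 0 ≤ c.2 ∧ c.2 < (input.length : Int)
          ∧ cellB input c.1 c.2 = ty)) := by
  have hc : cellB = cellA := rfl
  simp only [dirsA, List.filterMap_cons, List.filterMap_nil, List.filter_cons, List.filter_nil,
    widthB_eq, hc, decide_eq_true_eq, sub_neg_eq_add, sub_zero]
  split_ifs <;> rfl

-- B's cursor-queue loop simulates A's pop-queue loop: the live part of B's queue is q.drop k
theorem bfsB_eq_getGardenA (input : List String) (ty : Char) :
    ∀ (fuel : Nat) (q : List (Int × Int)) (k : Nat) (garden seen : PySem.Set (Int × Int)),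
      bfsB input ty (widthB input) (input.length : Int) fuel q k garden seen
        = getGardenA input ty fuel (q.drop k) garden seen := by
  intro fuel
  induction fuel with
  | zero => intro q k garden seen; simp [getGardenA, bfsB]
  | succ n ih =>
    intro q k garden seen
    simp only [bfsB]
    cases hk : q[k]? with
    | none =>
      have hlen : q.length ≤ k := by
        by_contra h
        exact absurd hk (by simp [List.getElem?_eq_getElem (by omega : k < q.length)])
      rw [List.drop_eq_nil_of_le hlen]
      simp [getGardenA]
    | some p =>
      have hklen : k < q.length := by
        by_contra h
        rw [List.getElem?_eq_none (by omega)] at hk; cases hk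
      have hdrop : q.drop k = p :: q.drop (k + 1) := by
        rw [← List.getElem_cons_drop hklen]
        simp only [List.getElem?_eq_getElem hklen, Option.some.injEq] at hk
        rw [hk]
      rw [hdrop]
      simp only [getGardenA]
      split_ifs with h
      · exact ih q (k + 1) garden seen
      · rw [ih _ (k + 1) _ _,
          List.drop_append_of_le_length (by omega : k + 1 ≤ q.length),
          queue_push_eq input ty p]

theorem getGardenA_garden_nodup (input : List String) (ty : Char) :
    ∀ (fuel : Nat) (q : List (Int × Int)) (garden seen : PySem.Set (Int × Int)),
      garden.Nodup → (getGardenA input ty fuel q garden seen).1.Nodup := by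
  intro fuel
  induction fuel with
  | zero => intro q garden seen h; simpa [getGardenA] using h
  | succ n ih =>
    intro q garden seen h
    cases q with
    | nil => simpa [getGardenA] using h
    | cons p rest =>
      simp only [getGardenA]
      split_ifs with hp
      · exact ih rest garden seen h
      · exact ih _ _ _ (PySem.Set.nodup_add _ _ h)

theorem getGardenA_garden_mono (input : List String) (ty : Char) :
    ∀ (fuel : Nat) (q : List (Int × Int)) (garden seen : PySem.Set (Int × Int)) (x : Int × Int),
      x ∈ garden → x ∈ (getGardenA input ty fuel q garden seen).1 := by
  intro fuel
  induction fuel with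
  | zero => intro q garden seen x hx; simpa [getGardenA] using hx
  | succ n ih =>
    intro q garden seen x hx
    cases q with
    | nil => simpa [getGardenA] using hx
    | cons p rest =>
      simp only [getGardenA]
      split_ifs with hp
      · exact ih rest garden seen x hx
      · exact ih _ _ _ x (by simp [PySem.Set.mem_add, hx])

theorem getGardenA_start_mem (input : List String) (ty : Char) (fuel : Nat) (hf : 0 < fuel)
    (p : Int × Int) (seen : PySem.Set (Int × Int)) :
    p ∈ (getGardenA input ty fuel [p] PySem.Set.empty seen).1 := by
  cases fuel with
  | zero => omega
  | succ n =>
    simp only [getGardenA]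
    split_ifs with hp
    · simp [PySem.Set.empty] at hp
    · exact getGardenA_garden_mono input ty n _ _ _ p (by simp [PySem.Set.add, PySem.Set.empty])


theorem scan_count (M : Int → Prop) [DecidablePred M] :
    ∀ (n : Nat) (a b : Int), (b - a).toNat = n → ∀ (c : Int) (t : Bool), (t = true ↔ M (a - 1)) →
    ((PySem.List.pyRange a b 1).foldl
      (fun (st : Int × Bool) j =>
        if M j then (if st.2 then st else (st.1 + 1, true)) else (st.1, false)) (c, t)).1
    = c + (((PySem.List.pyRange a b 1).countP (fun j => decide (M j ∧ ¬ M (j - 1)))) : Int) := by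
  intro n
  induction n with
  | zero =>
    intro a b hn c t ht
    rw [PySem.List.pyRange_one_eq_nil (by omega)]
    simp
  | succ n ih =>
    intro a b hn c t ht
    have hab : a < b := by omega
    rw [PySem.List.pyRange_one_cons hab, List.foldl_cons, List.countP_cons]
    have ha1 : a + 1 - 1 = a := by ring
    by_cases hM : M a
    · cases t with
      | true =>
        have h1 : decide (M a ∧ ¬ M (a - 1)) = false := by simp [hM, ht.mp rfl]
        rw [h1, if_pos hM]
        have e : (if (c, true).2 = true then (c, true) else ((c, true).1 + 1, true))
            = (c, true) := rfl
        rw [e, ih (a + 1) b (by omega) c true (by simp [ha1, hM])]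
        simp
      | false =>
        have hta : ¬ M (a - 1) := fun h => by simpa using ht.mpr h
        have h1 : decide (M a ∧ ¬ M (a - 1)) = true := by simp [hM, hta]
        rw [h1, if_pos hM]
        have e : (if (c, false).2 = true then (c, false) else ((c, false).1 + 1, true))
            = (c + 1, true) := rfl
        rw [e, ih (a + 1) b (by omega) (c + 1) true (by simp [ha1, hM])]
        simp; omega
    · have h1 : decide (M a ∧ ¬ M (a - 1)) = false := by simp [hM]
      rw [h1, if_neg hM]
      have e : (((c, t).1, false) : Int × Bool) = (c, false) := rfl
      rw [e, ih (a + 1) b (by omega) c false (by simp [ha1, hM])]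
      simp

theorem sum_count_grid (L1 L2 : List Int) (f : Int → Int → Bool) (mk : Int → Int → Int × Int)
    (R : Int × Int → Bool) (h : ∀ u v, f u v = R (mk u v)) :
    (L1.map (fun u => ((L2.countP (f u)) : Int))).sum
      = (((L1.flatMap (fun u => L2.map (mk u))).countP R) : Int) := by
  induction L1 with
  | nil => simp
  | cons u L1 ih =>
    simp only [List.map_cons, List.sum_cons, List.flatMap_cons, List.countP_append, ih,
      List.countP_map]
    have : L2.countP (R ∘ mk u) = L2.countP (f u) := by
      apply List.countP_congr; intro v _; simp [h u v]
    rw [this]; push_cast; ring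

theorem countP_eq_count (l₁ l₂ : List (Int × Int)) (p q : Int × Int → Bool)
    (h1 : l₁.Nodup) (h2 : l₂.Nodup)
    (hmem : ∀ x, (x ∈ l₁ ∧ p x = true) ↔ (x ∈ l₂ ∧ q x = true)) :
    l₁.countP p = l₂.countP q := by
  rw [List.countP_eq_length_filter, List.countP_eq_length_filter]
  apply List.Perm.length_eq
  rw [List.perm_ext_iff_of_nodup (h1.filter _) (h2.filter _)]
  intro a; simp only [List.mem_filter]; exact hmem a

theorem nodup_grid (L1 L2 : List Int) (mk : Int → Int → Int × Int) (h1 : L1.Nodup)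
    (h2 : L2.Nodup) (hinj : ∀ u v u' v', mk u v = mk u' v' → u = u' ∧ v = v') :
    (L1.flatMap (fun u => L2.map (mk u))).Nodup := by
  rw [List.nodup_flatMap]
  constructor
  · intro u _
    exact h2.map (fun v v' hv => (hinj u v u v' hv).2)
  · refine h1.imp ?_
    intro u u' huu
    intro a ha ha'
    simp only [List.mem_map] at ha ha'
    obtain ⟨v, _, rfl⟩ := ha
    obtain ⟨v', _, h⟩ := ha'
    exact huu ((hinj u' v' u v h).1.symm)


theorem perimB_eq (g : PySem.Set (Int × Int)) :
    perimB g = 2 * ((g.countP (fun p => decide ((p.1 - 1, p.2) ∉ g))) : Int)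
             + 2 * ((g.countP (fun p => decide ((p.1, p.2 - 1) ∉ g))) : Int) := by
  unfold perimB
  have hfg : ∀ (acc : Int), ∀ p ∈ g,
      (let acc1 := if (p.1 - 1, p.2) ∈ g then acc else acc + 2;
        if (p.1, p.2 - 1) ∈ g then acc1 else acc1 + 2)
      = acc + ((fun p => 2 * if (p.1 - 1, p.2) ∉ g then (1:Int) else 0) p
          + (fun p => 2 * if (p.1, p.2 - 1) ∉ g then (1:Int) else 0) p) := by
    intro acc p _
    by_cases h1 : (p.1 - 1, p.2) ∈ g <;> by_cases h2 : (p.1, p.2 - 1) ∈ g <;>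
      simp [h1, h2] <;> ring
  rw [PySem.List.foldl_congr_mem g _
    (fun acc p => acc + ((fun p => 2 * if (p.1 - 1, p.2) ∉ g then (1:Int) else 0) p
      + (fun p => 2 * if (p.1, p.2 - 1) ∉ g then (1:Int) else 0) p)) 0 hfg]
  rw [PySem.List.foldl_add, PySem.List.sum_map_add_int, PySem.List.sum_map_const_mul_int,
    PySem.List.sum_map_const_mul_int, PySem.List.sum_map_ite_one_zero',
    PySem.List.sum_map_ite_one_zero']
  ring

theorem mem_grid_mk (L1 L2 : List Int) (x : Int × Int) :
    x ∈ L1.flatMap (fun u => L2.map (fun v => (u, v))) ↔ x.1 ∈ L1 ∧ x.2 ∈ L2 := by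
  simp only [List.mem_flatMap, List.mem_map]
  constructor
  · rintro ⟨u, hu, v, hv, rfl⟩; exact ⟨hu, hv⟩
  · rintro ⟨h1, h2⟩; exact ⟨x.1, h1, x.2, h2, rfl⟩

theorem mem_grid_swap (L1 L2 : List Int) (x : Int × Int) :
    x ∈ L1.flatMap (fun v => L2.map (fun u => (u, v))) ↔ x.2 ∈ L1 ∧ x.1 ∈ L2 := by
  simp only [List.mem_flatMap, List.mem_map]
  constructor
  · rintro ⟨v, hv, u, hu, rfl⟩; exact ⟨hv, hu⟩
  · rintro ⟨h1, h2⟩; exact ⟨x.2, h1, x.1, h2, rfl⟩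

theorem xPer_eq (g : PySem.Set (Int × Int)) (hnd : g.Nodup) (minX maxX minY maxY : Int)
    (hx1 : ∀ p ∈ g, minX ≤ p.1) (hx2 : ∀ p ∈ g, p.1 ≤ maxX)
    (hy1 : ∀ p ∈ g, minY ≤ p.2) (hy2 : ∀ p ∈ g, p.2 ≤ maxY) :
    ((PySem.List.pyRange minX (maxX + 1) 1).foldl (fun acc i =>
      ((PySem.List.pyRange minY (maxY + 1) 1).foldl (fun (st : Int × Bool) j =>
        if (i, j) ∈ g then (if st.2 then st else (st.1 + 1, true)) else (st.1, false))
        (acc, false)).1) 0)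
    = ((g.countP (fun p => decide ((p.1, p.2 - 1) ∉ g))) : Int) := by
  have hscan : ∀ (acc : Int), ∀ i ∈ PySem.List.pyRange minX (maxX + 1) 1,
      (fun acc i => ((PySem.List.pyRange minY (maxY + 1) 1).foldl (fun (st : Int × Bool) j =>
        if (i, j) ∈ g then (if st.2 then st else (st.1 + 1, true)) else (st.1, false))
        (acc, false)).1) acc i
      = (fun acc (i : Int) => acc + (((PySem.List.pyRange minY (maxY + 1) 1).countP
          (fun j => decide ((i, j) ∈ g ∧ ¬ ((i, j - 1) ∈ g)))) : Int)) acc i := by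
    intro acc i _
    refine scan_count (fun j => (i, j) ∈ g) ((maxY + 1) - minY).toNat minY (maxY + 1) rfl acc
      false ?_
    constructor
    · intro h; exact absurd h (by simp)
    · intro h; exact absurd (hy1 _ h) (by simp)
  rw [PySem.List.foldl_congr_mem _ _ _ 0 hscan]
  rw [PySem.List.foldl_add]
  rw [sum_count_grid (PySem.List.pyRange minX (maxX + 1) 1) (PySem.List.pyRange minY (maxY + 1) 1)
      _ (fun u v => (u, v)) (fun p => decide (p ∈ g ∧ ¬ ((p.1, p.2 - 1) ∈ g)))
      (by intro u v; simp)]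
  rw [countP_eq_count _ g _ (fun p => decide ((p.1, p.2 - 1) ∉ g))
      (nodup_grid _ _ _ (PySem.List.nodup_pyRange_one _ _) (PySem.List.nodup_pyRange_one _ _)
        (by intro u v u' v' h; simpa [Prod.ext_iff] using h))
      hnd
      (by intro x
          simp only [mem_grid_mk, PySem.List.mem_pyRange_one, decide_eq_true_eq]
          constructor
          · rintro ⟨_, hg, hup⟩; exact ⟨hg, hup⟩
          · rintro ⟨hg, hup⟩
            exact ⟨⟨⟨hx1 _ hg, by have := hx2 _ hg; omega⟩, ⟨hy1 _ hg, by have := hy2 _ hg; omega⟩⟩,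
              hg, hup⟩)]
  simp

theorem yPer_eq (g : PySem.Set (Int × Int)) (hnd : g.Nodup) (minX maxX minY maxY : Int)
    (hx1 : ∀ p ∈ g, minX ≤ p.1) (hx2 : ∀ p ∈ g, p.1 ≤ maxX)
    (hy1 : ∀ p ∈ g, minY ≤ p.2) (hy2 : ∀ p ∈ g, p.2 ≤ maxY) :
    ((PySem.List.pyRange minY (maxY + 1) 1).foldl (fun acc j =>
      ((PySem.List.pyRange minX (maxX + 1) 1).foldl (fun (st : Int × Bool) i =>
        if (i, j) ∈ g then (if st.2 then st else (st.1 + 1, true)) else (st.1, false))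
        (acc, false)).1) 0)
    = ((g.countP (fun p => decide ((p.1 - 1, p.2) ∉ g))) : Int) := by
  have hscan : ∀ (acc : Int), ∀ j ∈ PySem.List.pyRange minY (maxY + 1) 1,
      (fun acc j => ((PySem.List.pyRange minX (maxX + 1) 1).foldl (fun (st : Int × Bool) i =>
        if (i, j) ∈ g then (if st.2 then st else (st.1 + 1, true)) else (st.1, false))
        (acc, false)).1) acc j
      = (fun acc (j : Int) => acc + (((PySem.List.pyRange minX (maxX + 1) 1).countP
          (fun i => decide ((i, j) ∈ g ∧ ¬ ((i - 1, j) ∈ g)))) : Int)) acc j := by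
    intro acc j _
    refine scan_count (fun i => (i, j) ∈ g) ((maxX + 1) - minX).toNat minX (maxX + 1) rfl acc
      false ?_
    constructor
    · intro h; exact absurd h (by simp)
    · intro h; exact absurd (hx1 _ h) (by simp)
  rw [PySem.List.foldl_congr_mem _ _ _ 0 hscan]
  rw [PySem.List.foldl_add]
  rw [sum_count_grid (PySem.List.pyRange minY (maxY + 1) 1) (PySem.List.pyRange minX (maxX + 1) 1)
      _ (fun v u => (u, v)) (fun p => decide (p ∈ g ∧ ¬ ((p.1 - 1, p.2) ∈ g)))
      (by intro u v; simp)]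
  rw [countP_eq_count _ g _ (fun p => decide ((p.1 - 1, p.2) ∉ g))
      (nodup_grid _ _ _ (PySem.List.nodup_pyRange_one _ _) (PySem.List.nodup_pyRange_one _ _)
        (by intro u v u' v' h; rw [Prod.ext_iff] at h; simp at h; exact ⟨h.2, h.1⟩))
      hnd
      (by intro x
          simp only [mem_grid_swap, PySem.List.mem_pyRange_one, decide_eq_true_eq]
          constructor
          · rintro ⟨_, hg, hup⟩; exact ⟨hg, hup⟩
          · rintro ⟨hg, hup⟩
            exact ⟨⟨⟨hy1 _ hg, by have := hy2 _ hg; omega⟩, ⟨hx1 _ hg, by have := hx2 _ hg; omega⟩⟩,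
              hg, hup⟩)]
  simp

theorem computeA_eq (g : PySem.Set (Int × Int)) (hnd : g.Nodup) (hne : g ≠ []) :
    computeGardenA g = (g.length : Int) * perimB g := by
  rcases hmx : PySem.List.min? (g.map Prod.fst) (fun v => v) with _ | minX
  · rw [PySem.List.min?_eq_none_iff] at hmx; exact absurd (List.map_eq_nil_iff.mp hmx) hne
  rcases hMx : PySem.List.max? (g.map Prod.fst) (fun v => v) with _ | maxX
  · rw [PySem.List.max?_eq_none_iff] at hMx; exact absurd (List.map_eq_nil_iff.mp hMx) hne
  rcases hmy : PySem.List.min? (g.map Prod.snd) (fun v => v) with _ | minY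
  · rw [PySem.List.min?_eq_none_iff] at hmy; exact absurd (List.map_eq_nil_iff.mp hmy) hne
  rcases hMy : PySem.List.max? (g.map Prod.snd) (fun v => v) with _ | maxY
  · rw [PySem.List.max?_eq_none_iff] at hMy; exact absurd (List.map_eq_nil_iff.mp hMy) hne
  have hx1 : ∀ p ∈ g, minX ≤ p.1 :=
    fun p hp => PySem.List.min?_isMin hmx p.1 (List.mem_map_of_mem hp)
  have hx2 : ∀ p ∈ g, p.1 ≤ maxX :=
    fun p hp => PySem.List.max?_isMax hMx p.1 (List.mem_map_of_mem hp)
  have hy1 : ∀ p ∈ g, minY ≤ p.2 :=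
    fun p hp => PySem.List.min?_isMin hmy p.2 (List.mem_map_of_mem hp)
  have hy2 : ∀ p ∈ g, p.2 ≤ maxY :=
    fun p hp => PySem.List.max?_isMax hMy p.2 (List.mem_map_of_mem hp)
  simp only [computeGardenA, hmx, hMx, hmy, hMy, Option.getD_some]
  rw [xPer_eq g hnd minX maxX minY maxY hx1 hx2 hy1 hy2,
    yPer_eq g hnd minX maxX minY maxY hx1 hx2 hy1 hy2, perimB_eq]
  ring

theorem solve_spec : Claim_equal_solve := by
  intro input _ _
  unfold Spec_solve solve solve_alt
  refine congrArg Prod.snd ?_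
  refine PySem.List.foldl_congr_mem _ _ _ _ ?_
  intro st i _
  refine PySem.List.foldl_congr_mem _ _ _ _ ?_
  intro st' j _
  by_cases hmem : (j, i) ∈ st'.1
  · simp [hmem]
  · simp only [if_neg hmem]
    have hg : bfsB input (cellB input j i) (widthB input) (input.length : Int) (fuelB input)
          [(j, i)] 0 PySem.Set.empty st'.1
        = getGardenA input (cellA input j i) (fuelA input) [(j, i)] PySem.Set.empty st'.1 := by
      rw [fuelB_eq, show cellB = cellA from rfl,
        bfsB_eq_getGardenA input (cellA input j i) (fuelA input) [(j, i)] 0 PySem.Set.empty st'.1]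
      rfl
    rw [hg]
    have hfpos : 0 < fuelA input := by unfold fuelA; omega
    have hmemg : (j, i) ∈ (getGardenA input (cellA input j i) (fuelA input) [(j, i)]
        PySem.Set.empty st'.1).1 :=
      getGardenA_start_mem input (cellA input j i) (fuelA input) hfpos (j, i) st'.1
    rw [computeA_eq _
      (getGardenA_garden_nodup input (cellA input j i) (fuelA input) [(j, i)] PySem.Set.empty
        st'.1 List.nodup_nil)
      (List.ne_nil_of_mem hmemg)]
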